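-- pv_equiv track=rewrite | github.com/Lekanville/bbt_research | code/tools/tools.py | warp_degree
-- ===== SOURCE A (Python) =====
-- def warp_degree(path_x, path_y):
--     mag = []
--     for i in range(len(path_x)-1):
--         if path_x[i] == path_x[i+1]:
--             mag.append(path_x[i])
--
--     for i in range(len(path_y)-1):
--         if path_y[i] == path_y[i+1]:
--             mag.append(path_y[i])
--     return len(mag)
-- ===== SOURCE B (Python) =====
-- from itertools import groupby
--
-- def warp_degree(path_x, path_y):
--     # run-length view: each maximal run of k equal elements contributes k-1 adjacent-equal pairs
--     total = 0
--     for path in (path_x, path_y):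
--         for _, g in groupby(path):
--             total += sum(1 for _ in g) - 1
--     return total
-- ===== Notes on version B (the rewrite author's own statement) =====
-- stated objective: idiomatic
-- what changed: B splits each path into maximal runs of equal elements with itertools.groupby and sums (run length - 1) per run, instead of A's index loop that appends matching elements to a list and returns its length.
import Mathlib
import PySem

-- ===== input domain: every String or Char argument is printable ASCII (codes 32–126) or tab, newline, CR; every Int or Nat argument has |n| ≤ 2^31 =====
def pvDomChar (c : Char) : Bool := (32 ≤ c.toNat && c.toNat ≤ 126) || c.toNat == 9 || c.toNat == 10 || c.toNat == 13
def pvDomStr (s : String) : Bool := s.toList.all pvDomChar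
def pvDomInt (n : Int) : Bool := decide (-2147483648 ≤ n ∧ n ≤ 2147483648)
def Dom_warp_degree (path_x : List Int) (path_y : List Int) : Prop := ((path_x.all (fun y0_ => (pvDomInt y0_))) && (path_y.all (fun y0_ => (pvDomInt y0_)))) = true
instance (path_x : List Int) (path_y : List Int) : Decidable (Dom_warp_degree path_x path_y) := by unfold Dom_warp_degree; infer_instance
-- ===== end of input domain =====

-- B counts adjacent-equal pairs via maximal runs (groupby: each run of length k contributes k-1),
-- replacing A's index loop that appends matching elements to a list and returns its length; objective: idiomatic.

-- ===== PORT A =====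
-- one loop body of A: for i in range(len(p)-1): if p[i] == p[i+1]: mag.append(p[i])
def pvAdjStep (p : List Int) (mag : List Int) (i : Int) : List Int :=
  if PySem.List.pyGetD p i 0 = PySem.List.pyGetD p (i+1) 0 then mag ++ [PySem.List.pyGetD p i 0] else mag

def warp_degree (path_x : List Int) (path_y : List Int) : Int :=
  let mag : List Int := []
  let mag := (PySem.List.pyRange 0 ((path_x.length : Int) - 1) 1).foldl (pvAdjStep path_x) mag
  let mag := (PySem.List.pyRange 0 ((path_y.length : Int) - 1) 1).foldl (pvAdjStep path_y) mag
  (mag.length : Int)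

-- ===== PORT B =====
-- hand-port of itertools.groupby restricted to run LENGTHS: pvRunLens p = lengths of maximal runs
def pvRunGo (cur : Int) (n : Int) : List Int → List Int
  | [] => [n]
  | y :: ys => if y = cur then pvRunGo cur (n + 1) ys else n :: pvRunGo y 1 ys

def pvRunLens : List Int → List Int
  | [] => []
  | x :: xs => pvRunGo x 1 xs

def warp_degree_alt (path_x : List Int) (path_y : List Int) : Int :=
  ((pvRunLens path_x).map (· - 1)).sum + ((pvRunLens path_y).map (· - 1)).sum

-- ===== PRECONDITION & SPEC =====
def Spec_warp_degree (path_x : List Int) (path_y : List Int) (out : Int) : Prop := out = warp_degree_alt path_x path_y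
instance (path_x : List Int) (path_y : List Int) (out : Int) : Decidable (Spec_warp_degree path_x path_y out) := by unfold Spec_warp_degree; infer_instance

-- ===== CLAIM (what is proved, stated in full; the proofs are below) =====
def Claim_equal_warp_degree : Prop := ∀ (path_x : List Int) (path_y : List Int), Dom_warp_degree path_x path_y → Spec_warp_degree path_x path_y (warp_degree path_x path_y)

-- ===== LEMMAS AND PROOFS =====

-- reference count of adjacent-equal pairs
def pvAdjN : List Int → Nat
  | x :: y :: t => (if x = y then 1 else 0) + pvAdjN (y :: t)
  | _ => 0

theorem pvFoldl_len (p : List Int) (l : List Int) (init : List Int) :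
    ((l.foldl (pvAdjStep p) init).length)
      = init.length + l.countP (fun i => decide (PySem.List.pyGetD p i 0 = PySem.List.pyGetD p (i+1) 0)) := by
  induction l generalizing init with
  | nil => simp
  | cons i l ih =>
    simp only [List.foldl_cons, List.countP_cons]
    rw [ih]
    by_cases h : PySem.List.pyGetD p i 0 = PySem.List.pyGetD p (i+1) 0
    · simp [pvAdjStep, h]; omega
    · simp [pvAdjStep, h]

theorem pvCountP_range (p : List Int) :
    (List.range (p.length - 1)).countP
        (fun k => decide (p.getD k 0 = p.getD (k+1) 0)) = pvAdjN p := by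
  induction p with
  | nil => simp [pvAdjN]
  | cons x xs ih =>
    cases xs with
    | nil => simp [pvAdjN]
    | cons y t =>
      have hlen : (x :: y :: t).length - 1 = ((y :: t).length - 1) + 1 := by
        simp
      rw [hlen, List.range_succ_eq_map, List.countP_cons, List.countP_map]
      have : ((List.range ((y :: t).length - 1)).countP
          ((fun k => decide ((x :: y :: t).getD k 0 = (x :: y :: t).getD (k+1) 0)) ∘ Nat.succ))
          = (List.range ((y :: t).length - 1)).countP
            (fun k => decide ((y :: t).getD k 0 = (y :: t).getD (k+1) 0)) := by
        apply List.countP_congr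
        intro k _
        simp [Function.comp, List.getD]
      rw [this, ih]
      simp [pvAdjN, List.getD]
      split_ifs <;> omega

theorem pvA_count (p : List Int) (init : List Int) :
    ((PySem.List.pyRange 0 ((p.length : Int) - 1) 1).foldl (pvAdjStep p) init).length
      = init.length + pvAdjN p := by
  rw [pvFoldl_len, PySem.List.pyRange_one]
  rw [List.countP_map]
  rw [← pvCountP_range p]
  have hx : ((p.length : Int) - 1 - 0).toNat = p.length - 1 := by omega
  rw [hx]
  congr 1
  apply List.countP_congr
  intro k _
  simp only [Function.comp, zero_add]
  have h2 : (k : Int) + 1 = (((k+1 : Nat)) : Int) := by push_cast; ring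
  rw [h2, PySem.List.pyGetD_natCast, PySem.List.pyGetD_natCast]

theorem pvRunGo_sum (ys : List Int) (c n : Int) :
    ((pvRunGo c n ys).map (· - 1)).sum = (n - 1) + (pvAdjN (c :: ys) : Int) := by
  induction ys generalizing c n with
  | nil => simp [pvRunGo, pvAdjN]
  | cons y t ih =>
    simp only [pvRunGo]
    split_ifs with h
    · rw [ih]
      subst h
      simp [pvAdjN]
      ring
    · simp only [List.map_cons, List.sum_cons, ih]
      have : pvAdjN (c :: y :: t) = (if c = y then 1 else 0) + pvAdjN (y :: t) := rfl
      rw [this, if_neg (fun hc => h hc.symm)]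
      push_cast
      ring

theorem pvB_count (p : List Int) :
    ((pvRunLens p).map (· - 1)).sum = (pvAdjN p : Int) := by
  cases p with
  | nil => simp [pvRunLens, pvAdjN]
  | cons x xs =>
    rw [pvRunLens, pvRunGo_sum]
    ring

-- ===== VERDICT (by name: the statement is the Claim_ definition above) =====
theorem warp_degree_spec : Claim_equal_warp_degree := by
  intro px py _
  unfold Spec_warp_degree warp_degree warp_degree_alt
  simp only
  rw [pvB_count, pvB_count]
  have h1 := pvA_count px ([] : List Int)
  have h2 := pvA_count py ((PySem.List.pyRange 0 ((px.length : Int) - 1) 1).foldl (pvAdjStep px) ([] : List Int))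
  rw [h2, h1]
  push_cast
  simp
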